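-- pv_equiv track=rewrite | github.com/RenatoCostaDev/fastapi_class_apis | apiTools.py | delete_client_by_id
-- ===== SOURCE A (Python) =====
-- def delete_client_by_id(id, lista_clientes):
--     id_delete = None
--
--     for index, client in enumerate(lista_clientes):
--         if client['id'] == id:
--             id_delete = index
--
--     if id_delete is not None:
--         del lista_clientes[id_delete]
--
--     return lista_clientes
-- ===== SOURCE B (Python) =====
-- def delete_client_by_id(id, lista_clientes):
--     # Scan back-to-front and delete the first match found (= last overall), stopping immediately.
--     for i in range(len(lista_clientes) - 1, -1, -1):
--         if lista_clientes[i]['id'] == id: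
--             del lista_clientes[i]
--             break
--     return lista_clientes
-- ===== Notes on version B (the rewrite author's own statement) =====
-- stated objective: simpler
-- what changed: Replaced the forward full scan that remembers the last matching index (then deletes it) by a reverse index scan that deletes the first match it meets and breaks immediately, with no accumulator variable.
import Mathlib
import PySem

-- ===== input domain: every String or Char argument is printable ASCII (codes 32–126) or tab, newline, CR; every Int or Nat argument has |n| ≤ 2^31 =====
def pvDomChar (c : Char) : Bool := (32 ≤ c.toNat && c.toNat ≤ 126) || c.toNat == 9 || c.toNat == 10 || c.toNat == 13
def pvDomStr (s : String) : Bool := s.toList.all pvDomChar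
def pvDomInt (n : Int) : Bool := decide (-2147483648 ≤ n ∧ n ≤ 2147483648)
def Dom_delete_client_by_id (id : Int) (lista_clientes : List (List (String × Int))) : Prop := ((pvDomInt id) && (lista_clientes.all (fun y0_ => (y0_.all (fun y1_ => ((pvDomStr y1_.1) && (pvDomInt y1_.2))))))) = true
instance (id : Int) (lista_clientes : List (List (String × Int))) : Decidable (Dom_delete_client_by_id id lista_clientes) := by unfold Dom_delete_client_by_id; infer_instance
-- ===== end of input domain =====

-- B replaces A's forward scan that remembers the last matching index by a reverse
-- index scan that deletes the first match it meets and breaks (objective: simpler).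
-- Both A and B mutate lista_clientes in place in Python; the equivalence proved
-- here is about the returned value, which is that same (mutated) list.


-- client['id']: first-match lookup in the dict-as-association-list; the KeyError
-- case (key absent) is excluded by Pre_, where the lookup here defaults to 0.
def pvGetId (c : List (String × Int)) : Int := (PySem.Dict.mk c).getD "id" 0

-- ===== PORT A =====
def delete_client_by_id (id : Int) (lista_clientes : List (List (String × Int))) : List (List (String × Int)) :=
  let id_delete : Option Int :=
    (PySem.List.enumerate lista_clientes).foldl
      (fun acc p => if pvGetId p.2 == id then some p.1 else acc) none
  match id_delete with
  | none => lista_clientes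
  | some i => lista_clientes.eraseIdx i.toNat  -- del lista_clientes[i]; i from enumerate, so 0 ≤ i < len

-- ===== PORT B =====
def pvAltGo (id : Int) (l : List (List (String × Int))) : List Int → List (List (String × Int))
  | [] => l
  | i :: rest =>
    if pvGetId ((PySem.List.pyGet? l i).getD []) == id then l.eraseIdx i.toNat  -- del l[i]; break
    else pvAltGo id l rest

def delete_client_by_id_alt (id : Int) (lista_clientes : List (List (String × Int))) : List (List (String × Int)) :=
  pvAltGo id lista_clientes (PySem.List.pyRange ((lista_clientes.length : Int) - 1) (-1) (-1))

-- ===== PRECONDITION & SPEC =====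
-- Pre_ excludes exactly the inputs on which Python A raises KeyError: a client dict without an "id" key.
def Pre_delete_client_by_id (id : Int) (lista_clientes : List (List (String × Int))) : Prop :=
  ∀ c ∈ lista_clientes, (PySem.Dict.mk c).contains "id" = true
instance (id : Int) (lista_clientes : List (List (String × Int))) : Decidable (Pre_delete_client_by_id id lista_clientes) := by unfold Pre_delete_client_by_id; infer_instance

def pvWitness_delete_client_by_id : Int × (List (List (String × Int))) := (7, [[("id", 7)], [("id", 3)]])

def Spec_delete_client_by_id (id : Int) (lista_clientes : List (List (String × Int))) (out : List (List (String × Int))) : Prop := out = delete_client_by_id_alt id lista_clientes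
instance (id : Int) (lista_clientes : List (List (String × Int))) (out : List (List (String × Int))) : Decidable (Spec_delete_client_by_id id lista_clientes out) := by unfold Spec_delete_client_by_id; infer_instance

-- ===== CLAIM (what is proved, stated in full; the proofs are below) =====
def Claim_equal_delete_client_by_id : Prop := ∀ (id : Int) (lista_clientes : List (List (String × Int))), Dom_delete_client_by_id id lista_clientes → Pre_delete_client_by_id id lista_clientes → Spec_delete_client_by_id id lista_clientes (delete_client_by_id id lista_clientes)

-- ===== LEMMAS AND PROOFS =====

-- A's fold: the last matching index.
def pvFoldA (id : Int) (l : List (List (String × Int))) : Option Int :=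
  (PySem.List.enumerate l).foldl (fun acc p => if pvGetId p.2 == id then some p.1 else acc) none

theorem pvFoldA_append (id : Int) (l : List (List (String × Int))) (c : List (String × Int)) :
    pvFoldA id (l ++ [c]) = if pvGetId c == id then some (l.length : Int) else pvFoldA id l := by
  unfold pvFoldA
  rw [PySem.List.enumerate_append, List.foldl_append]
  simp [PySem.List.enumerate]

theorem pvFoldA_bound (id : Int) (l : List (List (String × Int))) (i : Int)
    (h : pvFoldA id l = some i) : 0 ≤ i ∧ i < (l.length : Int) := by
  induction l using List.reverseRecOn with
  | nil => simp [pvFoldA, PySem.List.enumerate] at h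
  | append_singleton t c ih =>
    rw [pvFoldA_append] at h
    split at h
    · cases h
      simp only [List.length_append, List.length_cons, List.length_nil]
      constructor <;> [positivity; omega]
    · have := ih h
      simp only [List.length_append, List.length_cons, List.length_nil]
      push_cast
      omega

theorem pvAltGo_append (id : Int) (l : List (List (String × Int))) (c : List (String × Int))
    (idxs : List Int) (hb : ∀ i ∈ idxs, 0 ≤ i ∧ i < (l.length : Int)) :
    pvAltGo id (l ++ [c]) idxs = pvAltGo id l idxs ++ [c] := by
  induction idxs with
  | nil => simp [pvAltGo]
  | cons i rest ih =>
    obtain ⟨h0, hlt⟩ := hb i (by simp)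
    have hn : i.toNat < l.length := by omega
    have hget : PySem.List.pyGet? (l ++ [c]) i = PySem.List.pyGet? l i := by
      rw [PySem.List.pyGet?_of_nonneg (l ++ [c]) h0, PySem.List.pyGet?_of_nonneg l h0]
      exact List.getElem?_append_left hn
    simp only [pvAltGo, hget]
    split
    · rw [List.eraseIdx_append_of_lt_length hn]
    · exact ih (fun j hj => hb j (List.mem_cons_of_mem _ hj))

theorem pv_main (id : Int) (l : List (List (String × Int))) :
    delete_client_by_id id l = delete_client_by_id_alt id l := by
  induction l using List.reverseRecOn with
  | nil =>
    simp [delete_client_by_id, delete_client_by_id_alt, PySem.List.enumerate,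
      pvAltGo, PySem.List.pyRange_neg_one_eq_nil]
  | append_singleton t c ih =>
    have hA : delete_client_by_id id (t ++ [c]) =
        match pvFoldA id (t ++ [c]) with
        | none => t ++ [c]
        | some i => (t ++ [c]).eraseIdx i.toNat := rfl
    have hA' : delete_client_by_id id t =
        match pvFoldA id t with
        | none => t
        | some i => t.eraseIdx i.toNat := rfl
    have hlen : ((t ++ [c]).length : Int) - 1 = (t.length : Int) := by push_cast; simp
    have hrange : PySem.List.pyRange (((t ++ [c]).length : Int) - 1) (-1) (-1) =
        (t.length : Int) :: PySem.List.pyRange ((t.length : Int) - 1) (-1) (-1) := by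
      rw [hlen, PySem.List.pyRange_neg_one_cons (by omega)]
    have hgetc : PySem.List.pyGet? (t ++ [c]) (t.length : Int) = some c := by
      rw [PySem.List.pyGet?_natCast]
      simp
    rw [delete_client_by_id_alt, hrange]
    simp only [pvAltGo, hgetc, Option.getD_some]
    by_cases hm : pvGetId c == id
    · simp only [hm, if_true]
      rw [hA, pvFoldA_append]
      simp only [hm, if_true]
    · simp only [hm]
      have hbd : ∀ i ∈ PySem.List.pyRange ((t.length : Int) - 1) (-1) (-1),
          0 ≤ i ∧ i < (t.length : Int) := by
        intro i hi
        rw [PySem.List.mem_pyRange_neg_one] at hi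
        omega
      rw [pvAltGo_append id t c _ hbd]
      rw [hA, pvFoldA_append]
      simp only [hm]
      rw [← delete_client_by_id_alt, ← ih, hA']
      cases hF : pvFoldA id t with
      | none => simp
      | some i =>
        obtain ⟨h0, hlt⟩ := pvFoldA_bound id t i hF
        have : i.toNat < t.length := by omega
        simp [List.eraseIdx_append_of_lt_length this]

-- ===== VERDICT (by name: the statement is the Claim_ definition above) =====
theorem delete_client_by_id_spec : Claim_equal_delete_client_by_id := by
  intro id l _ _
  unfold Spec_delete_client_by_id
  exact pv_main id l
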